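-- pv_equiv track=rewrite | github.com/JijaProGamer/TrophyHunter | AI_Models/EntityDetector/main.py | transform_string_to_number
-- ===== SOURCE A (Python) =====
-- def transform_string_to_number(s):
--     replacements = {
--         'a': '4',
--         'A': '4',
--         'z': '2',
--         'o': '0',
--         'O': '0',
--         'l': '1',
--         'L': '1',
--         'I': '1',
--         'b': '8',
--         'g': '9',
--         't': '1',
--         'T': '1',
--         'j': '1',
--         'J': '1',
--         'n': '1',
--         's': '5',
--         'S': '5'
--     }
--
--     for key, value in replacements.items():
--         s = s.replace(key, value)
--
--     numeric_part = ''.join(char for char in s if char.isdigit())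
--     return int(numeric_part) if numeric_part else 0
-- ===== SOURCE B (Python) =====
-- _KEYS = "aAzoOlLIbgtTjJnsS"
-- _VALS = "44200111891111155"
--
-- def transform_string_to_number(s):
--     def digit_of(c):
--         i = _KEYS.find(c)
--         d = _VALS[i] if i >= 0 else c
--         return d if d.isdigit() else ''
--     digits = ''.join(digit_of(c) for c in s)
--     return int(digits) if digits else 0
-- ===== Notes on version B (the rewrite author's own statement) =====
-- stated objective: alternative
-- what changed: Replaces A's 17 sequential whole-string replace passes plus a separate digit-filter pass by a single pass over the string: each character is looked up in a pair of parallel key/value strings via str.find and contributes its mapped digit (or nothing) directly to the digit string; correct because no replacement digit is itself a key.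
import Mathlib
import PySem

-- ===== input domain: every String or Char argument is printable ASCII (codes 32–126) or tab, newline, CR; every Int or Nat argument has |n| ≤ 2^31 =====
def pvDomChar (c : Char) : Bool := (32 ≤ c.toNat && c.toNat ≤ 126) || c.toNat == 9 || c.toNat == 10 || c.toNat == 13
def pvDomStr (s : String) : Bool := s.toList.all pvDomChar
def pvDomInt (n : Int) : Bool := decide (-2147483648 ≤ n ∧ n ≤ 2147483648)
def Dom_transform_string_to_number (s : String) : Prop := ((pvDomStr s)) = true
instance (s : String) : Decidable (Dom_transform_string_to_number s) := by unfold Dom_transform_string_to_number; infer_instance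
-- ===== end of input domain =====

-- B replaces A's 17 whole-string replace passes + digit-filter pass by ONE pass over the string, looking each
-- character up in parallel key/value strings with str.find (alternative single-traversal decomposition).

-- ===== PORT A =====
-- the `replacements` dict of A, in insertion order
def pvReplacements : PySem.Dict Char Char := PySem.Dict.mk
  [('a','4'),('A','4'),('z','2'),('o','0'),('O','0'),('l','1'),('L','1'),('I','1'),
   ('b','8'),('g','9'),('t','1'),('T','1'),('j','1'),('J','1'),('n','1'),('s','5'),('S','5')]

def transform_string_to_number (s : String) : Int :=
  -- for key, value in replacements.items(): s = s.replace(key, value)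
  let s1 := pvReplacements.items.foldl
    (fun t kv => PySem.Str.replace t (String.ofList [kv.1]) (String.ofList [kv.2])) s
  -- ''.join(char for char in s if char.isdigit()): joining single chars with '' is the filtered char list (exact)
  let numeric_part := String.ofList (s1.toList.filter PySem.Chars.isdigit)
  -- int(numeric_part) if numeric_part else 0; int() always succeeds here (all-digit nonempty string)
  if numeric_part ≠ "" then (PySem.Int.ofStr? numeric_part).getD 0 else 0

-- ===== PORT B =====
-- the module constants _KEYS and _VALS of Source B
def pvKeys : List Char := "aAzoOlLIbgtTjJnsS".toList
def pvVals : List Char := "44200111891111155".toList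

-- the inner helper digit_of of Source B; '' / single-char strings are [] / [d] as lists
def pvDigitOf (c : Char) : List Char :=
  let i := PySem.Chars.find pvKeys [c]
  -- _VALS[i] if i >= 0: i is then a found index < 17 = len(_VALS), so in range (pyGetD's default is never used)
  let d := if i ≥ 0 then PySem.List.pyGetD pvVals i c else c
  if PySem.Chars.isdigit d then [d] else []

def transform_string_to_number_alt (s : String) : Int :=
  -- digits = ''.join(digit_of(c) for c in s)
  let digits := s.toList.flatMap pvDigitOf
  -- int(digits) if digits else 0
  if digits ≠ [] then (PySem.Int.ofStr? (String.ofList digits)).getD 0 else 0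

-- ===== PRECONDITION & SPEC =====
def Spec_transform_string_to_number (s : String) (out : Int) : Prop := out = transform_string_to_number_alt s
instance (s : String) (out : Int) : Decidable (Spec_transform_string_to_number s out) := by unfold Spec_transform_string_to_number; infer_instance

-- ===== CLAIM (what is proved, stated in full; the proofs are below) =====
def Claim_equal_transform_string_to_number : Prop := ∀ (s : String), Dom_transform_string_to_number s → Spec_transform_string_to_number s (transform_string_to_number s)

-- ===== LEMMAS AND PROOFS =====

-- single-character replace is a per-character map
theorem replace_go_single (k v : Char) :
    ∀ (l : List Char) (fuel : Nat) (acc : List Char), l.length ≤ fuel →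
      PySem.Chars.replace.go [k] [v] fuel l acc
        = acc.reverse ++ l.map (fun c => if c = k then v else c) := by
  intro l
  induction l with
  | nil =>
      intro fuel acc _
      cases fuel <;> simp [PySem.Chars.replace.go]
  | cons c t ih =>
      intro fuel acc hle
      cases fuel with
      | zero => simp at hle
      | succ m =>
        have hm : t.length ≤ m := by simpa using hle
        by_cases hc : c = k
        · subst hc
          simp [PySem.Chars.replace.go, List.isPrefixOf, ih m (v :: acc) hm]
        · have hkc : (k == c) = false := by simp; exact fun h => hc h.symm
          rw [show PySem.Chars.replace.go [k] [v] (m+1) (c::t) acc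
                = PySem.Chars.replace.go [k] [v] m t (c :: acc) by
              simp [PySem.Chars.replace.go, List.isPrefixOf, hkc]]
          rw [ih m (c :: acc) hm]
          simp [hc]

-- the per-character function that one single-character replace performs
def pvStep (k v c : Char) : Char := if c = k then v else c

theorem replace_single (k v : Char) (cs : List Char) :
    PySem.Chars.replace cs [k] [v] = cs.map (pvStep k v) := by
  simpa [PySem.Chars.replace] using replace_go_single k v cs cs.length [] le_rfl

-- A's 17 replace steps composed into one per-character function
def pvComp : Char → Char :=
  (pvStep 'S' '5') ∘ (pvStep 's' '5') ∘ (pvStep 'n' '1') ∘ (pvStep 'J' '1') ∘ (pvStep 'j' '1') ∘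
  (pvStep 'T' '1') ∘ (pvStep 't' '1') ∘ (pvStep 'g' '9') ∘ (pvStep 'b' '8') ∘ (pvStep 'I' '1') ∘
  (pvStep 'L' '1') ∘ (pvStep 'l' '1') ∘ (pvStep 'O' '0') ∘ (pvStep 'o' '0') ∘ (pvStep 'z' '2') ∘
  (pvStep 'A' '4') ∘ (pvStep 'a' '4')

-- per character: A's composed replace steps followed by the digit filter give exactly B's digit_of
theorem step_filter_eq_digitOf (c : Char) :
    (if PySem.Chars.isdigit (pvComp c) then [pvComp c] else []) = pvDigitOf c := by
  by_cases h0 : c = 'a'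
  · subst h0; decide
  by_cases h1 : c = 'A'
  · subst h1; decide
  by_cases h2 : c = 'z'
  · subst h2; decide
  by_cases h3 : c = 'o'
  · subst h3; decide
  by_cases h4 : c = 'O'
  · subst h4; decide
  by_cases h5 : c = 'l'
  · subst h5; decide
  by_cases h6 : c = 'L'
  · subst h6; decide
  by_cases h7 : c = 'I'
  · subst h7; decide
  by_cases h8 : c = 'b'
  · subst h8; decide
  by_cases h9 : c = 'g'
  · subst h9; decide
  by_cases h10 : c = 't'
  · subst h10; decide
  by_cases h11 : c = 'T'
  · subst h11; decide
  by_cases h12 : c = 'j'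
  · subst h12; decide
  by_cases h13 : c = 'J'
  · subst h13; decide
  by_cases h14 : c = 'n'
  · subst h14; decide
  by_cases h15 : c = 's'
  · subst h15; decide
  by_cases h16 : c = 'S'
  · subst h16; decide
  -- c is none of the 17 keys: every pvStep leaves it, and _KEYS.find(c) = -1
  have hmem : c ∉ pvKeys := by
    simp [pvKeys]
    exact ⟨h0, h1, h2, h3, h4, h5, h6, h7, h8, h9, h10, h11, h12, h13, h14, h15, h16⟩
  have hfind : PySem.Chars.find pvKeys [c] = -1 :=
    (PySem.Chars.find_eq_neg_one_iff pvKeys [c]).mpr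
      (fun hinf => hmem (List.singleton_sublist.mp hinf.sublist))
  simp [pvComp, pvStep, pvDigitOf, hfind, h0, h1, h2, h3, h4, h5, h6, h7, h8, h9, h10, h11, h12, h13, h14, h15, h16]

-- filtering the digits of the mapped list is B's single flatMap pass
theorem filter_map_eq_flatMap (l : List Char) :
    (l.map pvComp).filter PySem.Chars.isdigit = l.flatMap pvDigitOf := by
  induction l with
  | nil => simp
  | cons c t ih =>
      simp only [List.map_cons, List.flatMap_cons, ← ih, ← step_filter_eq_digitOf c]
      by_cases hd : PySem.Chars.isdigit (pvComp c) <;> simp [List.filter_cons, hd]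

theorem transform_string_to_number_spec : Claim_equal_transform_string_to_number := by
  intro s _
  unfold Spec_transform_string_to_number transform_string_to_number transform_string_to_number_alt
  simp only [pvReplacements, List.foldl_cons, List.foldl_nil]
  simp only [PySem.Str.toList_replace, String.toList_ofList, replace_single, List.map_map]
  have h17 : ∀ l : List Char,
      l.map ((pvStep 'S' '5') ∘ ((pvStep 's' '5') ∘ ((pvStep 'n' '1') ∘ ((pvStep 'J' '1') ∘ ((pvStep 'j' '1') ∘ ((pvStep 'T' '1') ∘ ((pvStep 't' '1') ∘ ((pvStep 'g' '9') ∘ ((pvStep 'b' '8') ∘ ((pvStep 'I' '1') ∘ ((pvStep 'L' '1') ∘ ((pvStep 'l' '1') ∘ ((pvStep 'O' '0') ∘ ((pvStep 'o' '0') ∘ ((pvStep 'z' '2') ∘ ((pvStep 'A' '4') ∘ (pvStep 'a' '4'))))))))))))))))) = l.map pvComp := by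
    intro l; rfl
  rw [h17, filter_map_eq_flatMap]
  rcases heq : s.toList.flatMap pvDigitOf with _ | _ <;> simp
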